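-- pv_equiv track=rewrite | github.com/SSJohns/CSE40657 | hw2/language_model2.py | window_next
-- ===== SOURCE A (Python) =====
-- from itertools import islice
--
-- def window(seq, n=2):
-- 	"Returns a sliding window (of width n) over data from the iterable"
-- 	"   s -> (s0,s1,...s[n-1]), (s1,s2,...,sn), ...                   "
-- 	it = iter(seq)
-- 	result = tuple(islice(it, n))
-- 	if len(result) == n:
-- 		yield result
-- 	for elem in it:
-- 		result = result[1:] + (elem,)
-- 		yield result
--
-- def window_next(seq, n=2):
-- 	table = window(seq,n)
-- 	t_rand = list()
-- 	feats = list()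
-- 	feats.extend(table)
-- 	for i in range(len(feats)-1):
-- 		t_rand.append( ( feats[i], feats[i+1][len(feats[i+1])-1] ) )
-- 	return t_rand
-- ===== SOURCE B (Python) =====
-- def window_next(seq, n=2):
--     s = list(seq)
--     return [(tuple(s[i:i + n]), s[i + n]) for i in range(len(s) - n)]
-- ===== Notes on version B (the rewrite author's own statement) =====
-- stated objective: simpler
-- what changed: Replaced the window() generator (incremental tuple-shifting state machine) plus the separate pairing pass over a materialized feats list by one direct comprehension over indices that slices each window and reads its successor element straight from the list.
-- outside the precondition, e.g. on window_next(['a', 'b'], -1): A raises ValueError, B returns [(('a',), 'b'), ((), 'a'), ((), 'b')]; on window_next(['a', 'b'], 0): A returns [((), 'a'), (('a',), 'b')], B returns [((), 'a'), ((), 'b')]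
import Mathlib
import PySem

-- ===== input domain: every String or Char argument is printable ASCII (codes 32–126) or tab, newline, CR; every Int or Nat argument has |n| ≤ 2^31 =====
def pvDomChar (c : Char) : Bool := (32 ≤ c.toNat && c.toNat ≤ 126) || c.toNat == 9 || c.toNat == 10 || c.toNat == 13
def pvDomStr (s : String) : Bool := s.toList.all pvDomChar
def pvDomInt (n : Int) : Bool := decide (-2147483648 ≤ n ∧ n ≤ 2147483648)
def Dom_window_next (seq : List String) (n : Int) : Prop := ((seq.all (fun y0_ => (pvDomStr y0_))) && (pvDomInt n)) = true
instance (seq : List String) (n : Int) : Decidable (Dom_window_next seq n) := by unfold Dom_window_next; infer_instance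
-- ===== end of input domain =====

-- B replaces A's generator-plus-pairing-pass by one direct index/slice comprehension (objective: simpler).

-- ===== PORT A =====
-- the shifted-window step of the generator's 'for elem in it' loop
def winStep (st : List String × List (List String)) (e : String) : List String × List (List String) :=
  (st.1.drop 1 ++ [e], st.2 ++ [st.1.drop 1 ++ [e]])

-- port of window(): 'result = tuple(islice(it, n))' = the first n elements; the loop runs over the rest
def windowGen (seq : List String) (n : Int) : List (List String) :=
  let init := seq.take n.toNat
  let first := if (init.length : Int) = n then [init] else []
  ((seq.drop n.toNat).foldl winStep (init, first)).2

-- 'feats[i]' / 'feats[i+1]' are always in range on the iterated indices, so getD is exact there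
def window_next (seq : List String) (n : Int) : List (List String × String) :=
  let feats := windowGen seq n
  (List.range (feats.length - 1)).foldl
    (fun t i =>
      t ++ [(feats.getD i [],
             (feats.getD (i + 1) []).getD ((feats.getD (i + 1) []).length - 1) "")]) []

-- ===== PORT B =====
-- 's[i:i+n]' with 0 ≤ i and 1 ≤ n is exactly (s.drop i).take n.toNat; 's[i+n]' is in range, so getD is exact
def window_next_alt (seq : List String) (n : Int) : List (List String × String) :=
  (List.range ((seq.length : Int) - n).toNat).map
    (fun i => ((seq.drop i).take n.toNat, seq.getD (i + n.toNat) ""))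

-- ===== PRECONDITION & SPEC =====
-- Pre_ excludes n ≤ 0: for negative n Python A raises ValueError (islice), and at n = 0 (width-0
-- windows, a corner no caller would specify) A's and B's outputs are both accidental artefacts of
-- their respective loop mechanics, equally defensible.
def Pre_window_next (seq : List String) (n : Int) : Prop := 1 ≤ n
instance (seq : List String) (n : Int) : Decidable (Pre_window_next seq n) := by unfold Pre_window_next; infer_instance
def pvWitness_window_next : List String × Int := (["a", "b", "c", "d"], 2)
def Spec_window_next (seq : List String) (n : Int) (out : List (List String × String)) : Prop := out = window_next_alt seq n
instance (seq : List String) (n : Int) (out : List (List String × String)) : Decidable (Spec_window_next seq n out) := by unfold Spec_window_next; infer_instance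

-- ===== CLAIM (what is proved, stated in full; the proofs are below) =====
def Claim_equal_window_next : Prop := ∀ (seq : List String) (n : Int), Dom_window_next seq n → Pre_window_next seq n → Spec_window_next seq n (window_next seq n)

-- ===== LEMMAS AND PROOFS =====

theorem foldl_append_map {α β : Type} (f : α → β) (l : List α) (acc : List β) :
    l.foldl (fun t x => t ++ [f x]) acc = acc ++ l.map f := by
  induction l generalizing acc with
  | nil => simp
  | cons x xs ih => simp [List.foldl_cons, ih]

theorem winfold (k : Nat) (hk : 1 ≤ k) :
    ∀ (rest r : List String) (acc : List (List String)), r.length = k →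
      (rest.foldl winStep (r, acc)).2
        = acc ++ (List.range rest.length).map (fun j => ((r ++ rest).drop (j + 1)).take k) := by
  intro rest
  induction rest with
  | nil => intro r acc _; simp
  | cons e rest ih =>
    intro r acc hr
    have hr1 : (r.drop 1 ++ [e]).length = k := by
      simp; omega
    have step : ((e :: rest).foldl winStep (r, acc)).2
        = (rest.foldl winStep (r.drop 1 ++ [e], acc ++ [r.drop 1 ++ [e]])).2 := by
      simp [List.foldl_cons, winStep]
    have hdrop : (r ++ e :: rest).drop 1 = r.drop 1 ++ e :: rest := by
      rw [List.drop_append_of_le_length (by omega)]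
    have hhead : ((r ++ e :: rest).drop 1).take k = r.drop 1 ++ [e] := by
      rw [hdrop, List.take_append]
      rw [List.take_of_length_le (by simp; omega)]
      have h2 : k - (r.drop 1).length = 1 := by simp; omega
      rw [h2]
      simp
    have htail : ∀ j, ((r.drop 1 ++ [e]) ++ rest).drop (j + 1) = (r ++ e :: rest).drop (j + 2) := by
      intro j
      have h3 : (r.drop 1 ++ [e]) ++ rest = (r ++ e :: rest).drop 1 := by
        rw [hdrop]; simp
      rw [h3, List.drop_drop]
      congr 1
      omega
    rw [step, ih _ _ hr1]
    have hmap : (List.range (e :: rest).length).map (fun j => ((r ++ e :: rest).drop (j + 1)).take k)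
        = (r.drop 1 ++ [e]) :: (List.range rest.length).map
            (fun j => (((r.drop 1 ++ [e]) ++ rest).drop (j + 1)).take k) := by
      rw [List.length_cons, List.range_succ_eq_map, List.map_cons, List.map_map]
      refine congrArg₂ List.cons ?_ ?_
      · simpa using hhead
      · apply List.map_congr_left
        intro j _
        show ((r ++ e :: rest).drop (j + 1 + 1)).take k
            = (((r.drop 1 ++ [e]) ++ rest).drop (j + 1)).take k
        rw [htail j]
    rw [hmap]
    simp

theorem feats_long (seq : List String) (k : Nat) (hk : 1 ≤ k) (hlen : k ≤ seq.length) :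
    windowGen seq (k : Int) = (List.range (seq.length - k + 1)).map (fun i => (seq.drop i).take k) := by
  unfold windowGen
  have htoNat : ((k : Int)).toNat = k := by simp
  have hinit : (seq.take k).length = k := by simp; omega
  simp only [htoNat]
  rw [if_pos (by exact_mod_cast hinit)]
  rw [winfold k hk _ _ _ hinit]
  rw [List.take_append_drop]
  have hlen2 : (seq.drop k).length = seq.length - k := by simp
  rw [hlen2, List.range_succ_eq_map, List.map_cons, List.map_map]
  simp only [List.drop_zero, List.singleton_append]
  refine congrArg₂ List.cons rfl ?_
  apply List.map_congr_left
  intro j _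
  simp [Function.comp, Nat.succ_eq_add_one]

theorem feats_short (seq : List String) (k : Nat) (hlen : seq.length < k) :
    windowGen seq (k : Int) = [] := by
  unfold windowGen
  have htoNat : ((k : Int)).toNat = k := by simp
  have htake : seq.take k = seq := List.take_of_length_le (by omega)
  have hdrop : seq.drop k = [] := List.drop_of_length_le (by omega)
  simp only [htoNat, htake, hdrop, List.foldl_nil]
  rw [if_neg (by exact_mod_cast (by omega : ¬ seq.length = k))]

theorem getD_map_range' {β : Type} (f : Nat → β) (m i : Nat) (d : β) (h : i < m) :
    ((List.range m).map f).getD i d = f i := by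
  rw [List.getD_eq_getElem?_getD, List.getElem?_map, List.getElem?_range h]
  rfl

-- ===== VERDICT (by name: the statement is the Claim_ definition above) =====
theorem window_next_spec : Claim_equal_window_next := by
  intro seq n _ hpre
  unfold Spec_window_next
  unfold Pre_window_next at hpre
  obtain ⟨k, rfl⟩ : ∃ k : Nat, n = (k : Int) := ⟨n.toNat, by omega⟩
  have hk1 : 1 ≤ k := by exact_mod_cast hpre
  simp only [window_next, window_next_alt, Int.toNat_natCast]
  by_cases hlen : k ≤ seq.length
  · rw [feats_long seq k hk1 hlen]
    have hsub : ((seq.length : Int) - (k : Int)).toNat = seq.length - k := by omega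
    rw [hsub]
    simp only [List.length_map, List.length_range]
    have hr1 : seq.length - k + 1 - 1 = seq.length - k := by omega
    rw [hr1, foldl_append_map, List.nil_append]
    apply List.map_congr_left
    intro i hi
    have hi' : i < seq.length - k := List.mem_range.mp hi
    rw [getD_map_range' _ _ _ _ (by omega), getD_map_range' _ _ _ _ (by omega)]
    have hwlen : ((seq.drop (i + 1)).take k).length = k := by
      simp; omega
    rw [hwlen]
    congr 1
    rw [List.getD_eq_getElem?_getD, List.getD_eq_getElem?_getD]
    rw [List.getElem?_take_of_lt (by omega), List.getElem?_drop]
    congr 2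
    omega
  · rw [feats_short seq k (by omega)]
    have hz : ((seq.length : Int) - (k : Int)).toNat = 0 := by omega
    simp [hz]
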